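-- pv_equiv track=rewrite | github.com/khushbooG9/nvm | src/nvm/orthogonal_patterns.py | calculate_half
-- ===== SOURCE A (Python) =====
-- def calculate_half(n):
--     r = 0;
--     q = n;
--
--     while q > 1 and r == 0:
--         if q == 20:
--             return 20
--         elif q == 12:
--             return 12
--         elif q == 4:
--             return 4;
--         else:
--             r = q % 2
--             q = q // 2
--
--     return -1;
-- ===== SOURCE B (Python) =====
-- def calculate_half(n):
--     if n <= 1:
--         return -1
--     m, e = n, 0
--     while m % 2 == 0:
--         m //= 2
--         e += 1
--     if e < 2:
--         return -1
--     if m == 5: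
--         return 20
--     if m == 3:
--         return 12
--     if m == 1:
--         return 4
--     return -1
-- ===== Notes on version B (the rewrite author's own statement) =====
-- stated objective: alternative
-- what changed: Instead of testing for the three target values inside the halving loop, B strips all factors of two once (n = m*2^e) and then decides with a single closed check on the odd part m and the exponent e.
import Mathlib
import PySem

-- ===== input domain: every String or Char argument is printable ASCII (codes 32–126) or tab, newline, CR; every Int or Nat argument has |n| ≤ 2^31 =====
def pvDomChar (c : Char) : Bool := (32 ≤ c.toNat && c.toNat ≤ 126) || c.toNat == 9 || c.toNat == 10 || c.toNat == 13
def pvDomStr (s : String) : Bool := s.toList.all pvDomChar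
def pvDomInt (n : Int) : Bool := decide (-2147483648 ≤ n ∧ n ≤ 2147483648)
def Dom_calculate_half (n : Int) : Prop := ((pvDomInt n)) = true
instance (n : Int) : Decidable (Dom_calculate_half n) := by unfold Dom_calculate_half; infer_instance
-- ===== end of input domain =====

-- B replaces the per-iteration target-value check inside A's halving loop by a one-time
-- "extract odd part and exponent, then one closed check" decomposition (alternative, same cost).

-- ===== PORT A =====
-- while q > 1 and r == 0: check the three target values, else r = q % 2; q = q // 2
def calcHalfLoop (q r : Int) : Int :=
  if _h : 1 < q ∧ r = 0 then
    if q = 20 then 20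
    else if q = 12 then 12
    else if q = 4 then 4
    else calcHalfLoop (PySem.Int.floordiv q 2) (PySem.Int.mod q 2)
  else -1
termination_by q.toNat
decreasing_by
  simp only [PySem.Int.floordiv_eq_ediv_of_pos (by omega : (0:Int) < 2)]
  omega

def calculate_half (n : Int) : Int := calcHalfLoop n 0

-- ===== PORT B =====
-- while m % 2 == 0: m //= 2; e += 1   (B only ever runs it with 0 < m; the 0 < m
-- guard makes the same computation total in Lean)
def stripTwos (m e : Int) : Int × Int :=
  if _h : 0 < m ∧ PySem.Int.mod m 2 = 0 then stripTwos (PySem.Int.floordiv m 2) (e + 1)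
  else (m, e)
termination_by m.toNat
decreasing_by
  simp only [PySem.Int.floordiv_eq_ediv_of_pos (by omega : (0:Int) < 2)]
  omega

def calculate_half_alt (n : Int) : Int :=
  if n ≤ 1 then -1
  else
    let p := stripTwos n 0
    if p.2 < 2 then -1
    else if p.1 = 5 then 20
    else if p.1 = 3 then 12
    else if p.1 = 1 then 4
    else -1

-- ===== PRECONDITION & SPEC =====
def Spec_calculate_half (n : Int) (out : Int) : Prop := out = calculate_half_alt n
instance (n : Int) (out : Int) : Decidable (Spec_calculate_half n out) := by unfold Spec_calculate_half; infer_instance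

-- ===== CLAIM (what is proved, stated in full; the proofs are below) =====
def Claim_equal_calculate_half : Prop := ∀ (n : Int), Dom_calculate_half n → Spec_calculate_half n (calculate_half n)

-- ===== LEMMAS AND PROOFS =====

theorem mod_two_pos {m : Int} (_hm : 0 < m) : PySem.Int.mod m 2 = m % 2 :=
  PySem.Int.mod_eq_emod_of_pos (by omega)

theorem fdiv_two_pos (m : Int) : PySem.Int.floordiv m 2 = m / 2 :=
  PySem.Int.floordiv_eq_ediv_of_pos (by omega)

theorem strip_even {m : Int} (h1 : 0 < m) (h2 : m % 2 = 0) (e : Int) :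
    stripTwos m e = stripTwos (m / 2) (e + 1) := by
  rw [stripTwos, dif_pos ⟨h1, by rw [mod_two_pos h1]; exact h2⟩, fdiv_two_pos]

theorem strip_stop {m : Int} (h : ¬ (0 < m ∧ PySem.Int.mod m 2 = 0)) (e : Int) :
    stripTwos m e = (m, e) := by
  rw [stripTwos, dif_neg h]

-- shifting the accumulator of stripTwos
theorem strip_shift (k : Nat) : ∀ m : Int, m.toNat ≤ k → ∀ e : Int,
    stripTwos m e = ((stripTwos m 0).1, e + (stripTwos m 0).2) := by
  induction k with
  | zero =>
    intro m hk e
    have h : ¬ (0 < m ∧ PySem.Int.mod m 2 = 0) := by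
      rintro ⟨h1, _⟩; omega
    rw [strip_stop h, strip_stop h]
    simp
  | succ k ih =>
    intro m hk e
    by_cases h : 0 < m ∧ PySem.Int.mod m 2 = 0
    · have hmod := h.2
      rw [mod_two_pos h.1] at hmod
      have hk2 : (m / 2).toNat ≤ k := by omega
      rw [strip_even h.1 hmod e, strip_even h.1 hmod 0]
      rw [ih (m / 2) hk2 (e + 1), ih (m / 2) hk2 (0 + 1)]
      simp only [Prod.mk.injEq]
      refine ⟨by simp, by simp; ring⟩
    · rw [strip_stop h, strip_stop h]
      simp
-- structure of the result of stripTwos: nonnegative exponent and the factorisation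
theorem strip_spec (k : Nat) : ∀ m : Int, m.toNat ≤ k → 0 < m →
    0 ≤ (stripTwos m 0).2 ∧ m = (stripTwos m 0).1 * 2 ^ (stripTwos m 0).2.toNat := by
  induction k with
  | zero => intro m hk hm; omega
  | succ k ih =>
    intro m hk hm
    by_cases h : 0 < m ∧ PySem.Int.mod m 2 = 0
    · have hmod := h.2
      rw [mod_two_pos h.1] at hmod
      have hq : 0 < m / 2 := by omega
      have hk2 : (m / 2).toNat ≤ k := by omega
      obtain ⟨h2, hdec⟩ := ih (m / 2) hk2 hq
      rw [strip_even h.1 hmod 0, strip_shift k (m / 2) hk2 (0 + 1)]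
      refine ⟨by simp only []; omega, ?_⟩
      have ht : (0 + 1 + (stripTwos (m / 2) 0).2).toNat = (stripTwos (m / 2) 0).2.toNat + 1 := by
        omega
      have key : (stripTwos (m / 2) 0).1 * 2 ^ (stripTwos (m / 2) 0).2.toNat * 2 = m := by
        rw [← hdec]; omega
      simp only [ht, pow_succ]
      rw [← mul_assoc, key]
    · rw [strip_stop h]
      simp
theorem main_lemma (k : Nat) : ∀ n : Int, n.toNat ≤ k → 2 ≤ n →
    calcHalfLoop n 0 = calculate_half_alt n := by
  induction k with
  | zero => intro n hk hn; omega
  | succ k ih =>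
    intro n hk hn
    unfold calculate_half_alt
    rw [if_neg (by omega : ¬ n ≤ 1)]
    by_cases h20 : n = 20
    · subst h20
      rw [calcHalfLoop, dif_pos (by omega), if_pos rfl]
      have hs : stripTwos (20:Int) 0 = (5, 2) := by
        rw [strip_even (by norm_num) (by norm_num) 0,
          show (20:Int) / 2 = 10 by norm_num,
          strip_even (by norm_num) (by norm_num) (0 + 1),
          show (10:Int) / 2 = 5 by norm_num,
          strip_stop (by decide) (0 + 1 + 1)]
        norm_num
      rw [hs]; norm_num
    · by_cases h12 : n = 12
      · subst h12
        rw [calcHalfLoop, dif_pos (by omega), if_neg (by omega), if_pos rfl]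
        have hs : stripTwos (12:Int) 0 = (3, 2) := by
          rw [strip_even (by norm_num) (by norm_num) 0,
            show (12:Int) / 2 = 6 by norm_num,
            strip_even (by norm_num) (by norm_num) (0 + 1),
            show (6:Int) / 2 = 3 by norm_num,
            strip_stop (by decide) (0 + 1 + 1)]
          norm_num
        rw [hs]; norm_num
      · by_cases h4 : n = 4
        · subst h4
          rw [calcHalfLoop, dif_pos (by omega), if_neg (by omega), if_neg (by omega), if_pos rfl]
          have hs : stripTwos (4:Int) 0 = (1, 2) := by
            rw [strip_even (by norm_num) (by norm_num) 0,
              show (4:Int) / 2 = 2 by norm_num,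
              strip_even (by norm_num) (by norm_num) (0 + 1),
              show (2:Int) / 2 = 1 by norm_num,
              strip_stop (by decide) (0 + 1 + 1)]
            norm_num
          rw [hs]; norm_num
        · -- n ≥ 2, not one of the sentinels
          rw [calcHalfLoop, dif_pos (by omega), if_neg h20, if_neg h12, if_neg h4]
          rw [fdiv_two_pos n, mod_two_pos (by omega : (0:Int) < n)]
          by_cases hev : n % 2 = 0
          · -- even: A recurses with r = 0; B's strip takes one step
            rw [hev]
            have hstrip : stripTwos n 0 = stripTwos (n / 2) (0 + 1) :=
              strip_even (by omega) hev 0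
            by_cases hq1 : n / 2 ≤ 1
            · -- then n = 2
              have hn2 : n = 2 := by omega
              subst hn2
              rw [show (2:Int) / 2 = 1 by norm_num] at hstrip ⊢
              rw [calcHalfLoop, dif_neg (by simp)]
              rw [strip_stop (by decide) (0 + 1)] at hstrip
              rw [hstrip]
              norm_num
            · have hq2 : (2:Int) ≤ n / 2 := by omega
              have hkq : (n / 2).toNat ≤ k := by omega
              rw [ih (n / 2) hkq hq2]
              unfold calculate_half_alt
              rw [if_neg (by omega : ¬ n / 2 ≤ 1)]
              obtain ⟨hpos2, hdec⟩ := strip_spec k (n / 2) hkq (by omega)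
              rw [hstrip, strip_shift k (n / 2) hkq (0 + 1)]
              set s := stripTwos (n / 2) 0 with hs
              simp only
              by_cases he2 : s.2 < 2
              · rw [if_pos he2]
                by_cases he1 : s.2 = 1
                · -- exponent exactly 1: n = 4 * s.1, and n ∉ {4,12,20}, so s.1 ∉ {1,3,5}
                  rw [if_neg (by omega : ¬ 0 + 1 + s.2 < 2)]
                  have ht : s.2.toNat = 1 := by omega
                  rw [ht] at hdec
                  have hn4 : n = s.1 * 4 := by
                    have hh : n = (n / 2) * 2 := by omega
                    rw [hh, hdec]; ring
                  rw [if_neg (by omega : ¬ s.1 = 5), if_neg (by omega : ¬ s.1 = 3),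
                    if_neg (by omega : ¬ s.1 = 1)]
                · rw [if_pos (by omega : 0 + 1 + s.2 < 2)]
              · rw [if_neg he2, if_neg (by omega : ¬ 0 + 1 + s.2 < 2)]
          · -- odd: r becomes 1, the loop exits, A returns -1; B's strip stops at once
            have hodd : n % 2 = 1 := by omega
            rw [hodd, calcHalfLoop, dif_neg (by simp)]
            rw [strip_stop (by rw [mod_two_pos (by omega : (0:Int) < n)]; omega) 0]
            norm_num

-- ===== VERDICT (by name: the statement is the Claim_ definition above) =====
theorem calculate_half_spec : Claim_equal_calculate_half := by
  intro n _
  unfold Spec_calculate_half calculate_half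
  by_cases hn : n ≤ 1
  · rw [calcHalfLoop, dif_neg (by omega)]
    unfold calculate_half_alt
    rw [if_pos hn]
  · exact main_lemma n.toNat n (le_refl _) (by omega)
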